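-- pv_equiv track=rewrite | github.com/pypi-data/pypi-mirror-310 | packages/xython/xython-3.2.1-py3-none-any.whl/xython/youtil.py | split_data_as_number_vs_char
-- ===== SOURCE A (Python) =====
-- def split_data_as_number_vs_char(raw_data):
-- 	"""
-- 	문자와숫자를 분리해서 리스트로 돌려주는 것이다
-- 	123wer -> ['123','wer']
-- 	:param raw_data:
-- 	:return:
-- 	"""
-- 	temp = ""
-- 	int_temp = ""
-- 	result = []
-- 	datas = str(raw_data)
-- 	for num in range(len(datas)):
-- 		if num == 0:
-- 			temp = str(datas[num])
-- 		else:
-- 			try: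
-- 				fore_var = int(datas[num])
-- 				fore_var_status = "integer"
-- 			except:
-- 				fore_var = datas[num]
-- 				fore_var_status = "string"
-- 			try:
-- 				back_var = int(datas[num - 1])
-- 				back_var_status = "integer"
-- 			except:
-- 				back_var = datas[num - 1]
-- 				back_var_status = "string"
--
-- 			if fore_var_status == back_var_status:
-- 				temp = temp + datas[num]
-- 			else:
-- 				result.append(temp)
-- 				temp = datas[num]
-- 	if len(temp) > 0:
-- 		result.append(temp)
-- 	return result
-- ===== SOURCE B (Python) =====
-- def split_data_as_number_vs_char(raw_data):
-- 	def cls(c):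
-- 		try:
-- 			int(c)
-- 			return True
-- 		except:
-- 			return False
-- 	s = str(raw_data)
-- 	out = []
-- 	i = 0
-- 	n = len(s)
-- 	while i < n:
-- 		j = i + 1
-- 		k = cls(s[i])
-- 		while j < n and cls(s[j]) == k:
-- 			j += 1
-- 		out.append(s[i:j])
-- 		i = j
-- 	return out
-- ===== Notes on version B (the rewrite author's own statement) =====
-- stated objective: simpler
-- what changed: Replaces A's per-character string accumulator (first-char special case, per-char try/except on both the current and previous char, end-of-loop flush) with a two-pointer run scanner that classifies each char once and slices out each maximal same-class run.
import Mathlib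
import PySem

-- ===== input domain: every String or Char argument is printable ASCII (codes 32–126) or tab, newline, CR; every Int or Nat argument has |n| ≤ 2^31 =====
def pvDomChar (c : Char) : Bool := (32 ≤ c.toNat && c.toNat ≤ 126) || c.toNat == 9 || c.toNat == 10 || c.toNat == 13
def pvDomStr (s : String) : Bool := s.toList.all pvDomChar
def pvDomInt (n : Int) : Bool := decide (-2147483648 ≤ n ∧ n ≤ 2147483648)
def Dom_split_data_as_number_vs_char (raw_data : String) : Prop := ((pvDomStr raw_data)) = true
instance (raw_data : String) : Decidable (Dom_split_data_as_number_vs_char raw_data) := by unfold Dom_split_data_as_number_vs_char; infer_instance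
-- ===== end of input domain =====

-- B replaces A's per-character accumulator (first-char special case + final flush) with a
-- two-pointer maximal-run scanner; objective: simpler.


-- ===== PORT A =====
-- try: int(c) … except: — succeeds exactly when PySem.Int.ofStr? returns some
def pvCls (c : Char) : Bool := (PySem.Int.ofStr? (String.singleton c)).isSome

-- A's for-loop over range(len(datas)): after num = 0 sets temp = datas[0], each later step
-- compares the class of datas[num] with datas[num-1]; here the recursion carries the previous
-- character explicitly (datas[num-1] is always the char consumed just before datas[num]).
def pvALoop (prev : Char) (temp : List Char) (result : List String) :
    List Char → List String × List Char
  | [] => (result, temp)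
  | c :: cs =>
      if pvCls c == pvCls prev then
        pvALoop c (temp ++ [c]) result cs
      else
        pvALoop c [c] (result ++ [String.ofList temp]) cs

def split_data_as_number_vs_char (raw_data : String) : List String :=
  match raw_data.toList with
  | [] => if ([] : List Char).length > 0 then [String.ofList []] else []
  | c :: cs =>
      let (result, temp) := pvALoop c [c] [] cs
      if temp.length > 0 then result ++ [String.ofList temp] else result

-- ===== PORT B =====
-- B's inner while loop advances j while the class matches s[i]'s class, then slices s[i:j]:
-- takeWhile is the run s[i+1:j], dropWhile the remainder s[j:].
def pvRunsB : List Char → List String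
  | [] => []
  | c :: cs =>
      String.ofList (c :: cs.takeWhile (fun d => pvCls d == pvCls c)) ::
        pvRunsB (cs.dropWhile (fun d => pvCls d == pvCls c))
termination_by l => l.length
decreasing_by
  simp only [List.length_cons]
  exact Nat.lt_succ_of_le (List.length_dropWhile_le _ _)

def split_data_as_number_vs_char_alt (raw_data : String) : List String :=
  pvRunsB raw_data.toList

-- ===== PRECONDITION & SPEC =====
def Spec_split_data_as_number_vs_char (raw_data : String) (out : List String) : Prop := out = split_data_as_number_vs_char_alt raw_data
instance (raw_data : String) (out : List String) : Decidable (Spec_split_data_as_number_vs_char raw_data out) := by unfold Spec_split_data_as_number_vs_char; infer_instance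

-- ===== CLAIM (what is proved, stated in full; the proofs are below) =====
def Claim_equal_split_data_as_number_vs_char : Prop := ∀ (raw_data : String), Dom_split_data_as_number_vs_char raw_data → Spec_split_data_as_number_vs_char raw_data (split_data_as_number_vs_char raw_data)

-- ===== LEMMAS AND PROOFS =====

theorem pvALoop_eq (cs : List Char) : ∀ (prev : Char) (temp : List Char) (result : List String),
    (pvALoop prev temp result cs).1 ++ [String.ofList (pvALoop prev temp result cs).2] =
      result ++ String.ofList (temp ++ cs.takeWhile (fun d => pvCls d == pvCls prev)) ::
        pvRunsB (cs.dropWhile (fun d => pvCls d == pvCls prev)) := by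
  induction cs with
  | nil => intro prev temp result; simp [pvALoop, pvRunsB]
  | cons c cs ih =>
      intro prev temp result
      by_cases h : pvCls c = pvCls prev
      · simp [pvALoop, h, ih]
      · have h' : (pvCls c == pvCls prev) = false := by simp [h]
        simp only [pvALoop, h', Bool.false_eq_true, if_false]
        rw [ih]
        simp [h', pvRunsB]

theorem split_eq (raw_data : String) :
    split_data_as_number_vs_char raw_data = split_data_as_number_vs_char_alt raw_data := by
  unfold split_data_as_number_vs_char split_data_as_number_vs_char_alt
  cases hl : raw_data.toList with
  | nil => simp [pvRunsB]
  | cons c cs =>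
      have key := pvALoop_eq cs c [c] []
      have hne : (pvALoop c [c] [] cs).2.length > 0 := by
        clear key
        induction cs generalizing c with
        | nil => simp [pvALoop]
        | cons d ds ih =>
            by_cases h : pvCls d = pvCls c
            · simpa [pvALoop, h] using
                (by
                  have : ∀ t : List Char,
                      (pvALoop d ([c] ++ [d] ++ t) [] ds).2.length > 0 := by
                    intro t
                    -- generalize over an arbitrary nonempty temp
                    have gen : ∀ (es : List Char) (p : Char) (tp : List Char) (r : List String),
                        tp ≠ [] → (pvALoop p tp r es).2 ≠ [] := by
                      intro es
                      induction es with
                      | nil => intro p tp r htp; simpa [pvALoop] using htp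
                      | cons e es ihe =>
                          intro p tp r htp
                          by_cases he : pvCls e = pvCls p
                          · simpa [pvALoop, he] using ihe e (tp ++ [e]) r (by simp)
                          · have he' : (pvCls e == pvCls p) = false := by simp [he]
                            simpa [pvALoop, he'] using ihe e [e] (r ++ [String.ofList tp]) (by simp)
                    simpa [List.length_pos_iff] using gen ds d ([c] ++ [d] ++ t) [] (by simp)
                  simpa using this [])
            · have gen : ∀ (es : List Char) (p : Char) (tp : List Char) (r : List String),
                  tp ≠ [] → (pvALoop p tp r es).2 ≠ [] := by
                intro es
                induction es with
                | nil => intro p tp r htp; simpa [pvALoop] using htp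
                | cons e es ihe =>
                    intro p tp r htp
                    by_cases he : pvCls e = pvCls p
                    · simpa [pvALoop, he] using ihe e (tp ++ [e]) r (by simp)
                    · have he' : (pvCls e == pvCls p) = false := by simp [he]
                      simpa [pvALoop, he'] using ihe e [e] (r ++ [String.ofList tp]) (by simp)
              have h' : (pvCls d == pvCls c) = false := by simp [h]
              simpa [pvALoop, h', List.length_pos_iff] using
                gen ds d [d] [String.ofList [c]] (by simp)
      simp only [if_pos hne]
      rw [key]
      simp [pvRunsB]

-- ===== VERDICT (by name: the statement is the Claim_ definition above) =====
theorem split_data_as_number_vs_char_spec : Claim_equal_split_data_as_number_vs_char := by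
  intro raw_data _
  unfold Spec_split_data_as_number_vs_char
  exact split_eq raw_data
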